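-- pv_equiv track=rewrite | github.com/Leapense/problems | 25165번: 영리한 아리의 포탈 타기/영리한 아리의 포탈 타기.py | simulate_ari_path
-- ===== SOURCE A (Python) =====
-- def simulate_ari_path(N, M, Ac, D, Sr, Sc):
--     # Ari's initial position and direction
--     current_col = Ac
--     current_row = 1
--     direction = D  # 0 is left, 1 is right
--
--     while current_row <= N:
--         # Determine the range of columns Ari will move across this row
--         if direction == 0:
--             # Moving left to column 1
--             start_col = current_col
--             end_col = 1
--             step = -1
--         else:
--             # Moving right to column M
--             start_col = current_col
--             end_col = M
--             step = 1
--
--         # Simulate movement across the row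
--         for col in range(start_col, end_col + step, step):
--             if current_row == Sr and col == Sc:
--                 # Ari meets the minion
--                 return "NO..."
--
--         # Move to the next row
--         current_row += 1
--         # Update the start column for the next row based on current end direction
--         if direction == 0:
--             current_col = 1  # She will start from the leftmost column next row
--         else:
--             current_col = M  # She will start from the rightmost column next row
--
--         # Toggle the direction for the next row
--         direction = 1 - direction
--
--     # If we finished all rows without meeting the minion
--     return "YES!"
-- ===== SOURCE B (Python) =====
-- def simulate_ari_path(N, M, Ac, D, Sr, Sc):
--     # O(1): the minion can only be met in its own row Sr, so compute the
--     # segment of columns the walk covers there and test Sc against it.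
--     if not (1 <= Sr <= N):
--         return "YES!"
--     d = D if Sr % 2 == 1 else 1 - D          # direction flips once per row
--     start = Ac if Sr == 1 else (1 if d == 1 else M)   # entry column of row Sr
--     if d == 0:
--         hit = 1 <= Sc <= start               # walking left, down to column 1
--     else:
--         hit = start <= Sc <= M               # walking right, up to column M
--     return "NO..." if hit else "YES!"
-- ===== Notes on version B (the rewrite author's own statement) =====
-- stated objective: faster
-- what changed: Replaced the cell-by-cell boustrophedon simulation (a while loop over rows with an inner range scan over columns) by an O(1) closed form: the direction in row Sr is D flipped once per row, the entry column is Ac in row 1 and otherwise the edge the previous row ended at, and the answer is a single interval test of Sc against that row's segment.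
import Mathlib
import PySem

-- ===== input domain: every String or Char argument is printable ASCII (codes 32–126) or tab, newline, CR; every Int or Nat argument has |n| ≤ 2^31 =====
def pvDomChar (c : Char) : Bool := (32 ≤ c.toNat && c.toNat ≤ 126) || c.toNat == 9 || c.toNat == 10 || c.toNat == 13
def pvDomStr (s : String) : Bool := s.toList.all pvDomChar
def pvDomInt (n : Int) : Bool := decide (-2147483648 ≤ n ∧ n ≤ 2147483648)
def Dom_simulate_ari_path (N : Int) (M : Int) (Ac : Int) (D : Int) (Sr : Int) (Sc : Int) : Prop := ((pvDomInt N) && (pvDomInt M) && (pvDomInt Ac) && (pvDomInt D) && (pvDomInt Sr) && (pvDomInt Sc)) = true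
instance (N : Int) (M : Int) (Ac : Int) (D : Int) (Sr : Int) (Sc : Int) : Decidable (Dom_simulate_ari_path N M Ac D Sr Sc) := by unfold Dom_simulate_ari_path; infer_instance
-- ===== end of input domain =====

-- B replaces A's cell-by-cell boustrophedon simulation by an O(1) closed-form check of Sc against the segment covered in row Sr (objective: faster).

-- ===== PORT A =====
-- the inner 'for col in range(...): if current_row == Sr and col == Sc: return "NO..."'
def ariRowScan (Sr : Int) (Sc : Int) (row : Int) : List Int → Bool
  | [] => false
  | c :: cs => if row = Sr ∧ c = Sc then true else ariRowScan Sr Sc row cs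

-- the 'while current_row <= N' loop; terminates because current_row increases toward N
def ariLoop (N : Int) (M : Int) (Sr : Int) (Sc : Int) (row : Int) (col : Int) (dir : Int) : String :=
  if _h : row ≤ N then
    let startc := col
    let endc : Int := if dir = 0 then 1 else M
    let step : Int := if dir = 0 then -1 else 1
    if ariRowScan Sr Sc row (PySem.List.pyRange startc (endc + step) step) then "NO..."
    else ariLoop N M Sr Sc (row + 1) (if dir = 0 then 1 else M) (1 - dir)
  else "YES!"
termination_by (N + 1 - row).toNat
decreasing_by omega

def simulate_ari_path (N : Int) (M : Int) (Ac : Int) (D : Int) (Sr : Int) (Sc : Int) : String :=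
  ariLoop N M Sr Sc 1 Ac D

-- ===== PORT B =====
def simulate_ari_path_alt (N : Int) (M : Int) (Ac : Int) (D : Int) (Sr : Int) (Sc : Int) : String :=
  if ¬ (1 ≤ Sr ∧ Sr ≤ N) then "YES!"
  else
    let d : Int := if PySem.Int.mod Sr 2 = 1 then D else 1 - D
    let start : Int := if Sr = 1 then Ac else (if d = 1 then 1 else M)
    let hit : Prop := if d = 0 then 1 ≤ Sc ∧ Sc ≤ start else start ≤ Sc ∧ Sc ≤ M
    if hit then "NO..." else "YES!"

-- ===== PRECONDITION & SPEC =====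
def Spec_simulate_ari_path (N : Int) (M : Int) (Ac : Int) (D : Int) (Sr : Int) (Sc : Int) (out : String) : Prop := out = simulate_ari_path_alt N M Ac D Sr Sc
instance (N : Int) (M : Int) (Ac : Int) (D : Int) (Sr : Int) (Sc : Int) (out : String) : Decidable (Spec_simulate_ari_path N M Ac D Sr Sc out) := by unfold Spec_simulate_ari_path; infer_instance

-- ===== CLAIM (what is proved, stated in full; the proofs are below) =====
def Claim_equal_simulate_ari_path : Prop := ∀ (N : Int) (M : Int) (Ac : Int) (D : Int) (Sr : Int) (Sc : Int), Dom_simulate_ari_path N M Ac D Sr Sc → Spec_simulate_ari_path N M Ac D Sr Sc (simulate_ari_path N M Ac D Sr Sc)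

-- ===== LEMMAS AND PROOFS =====
theorem ariRowScan_eq_true_iff (Sr Sc row : Int) (cs : List Int) :
    ariRowScan Sr Sc row cs = true ↔ row = Sr ∧ Sc ∈ cs := by
  induction cs with
  | nil => simp [ariRowScan]
  | cons c cs ih =>
    simp only [ariRowScan]
    split_ifs with h
    · simp [h.1, h.2.symm]
    · rw [ih]; constructor
      · rintro ⟨h1, h2⟩; exact ⟨h1, List.mem_cons_of_mem _ h2⟩
      · rintro ⟨h1, h2⟩
        rcases List.mem_cons.mp h2 with hc | hc
        · exact absurd ⟨h1, hc.symm⟩ h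
        · exact ⟨h1, hc⟩

-- B's closed form, restated as the interval condition the A-side analysis produces
theorem alt_char (N M Ac D Sr Sc : Int) :
    simulate_ari_path_alt N M Ac D Sr Sc =
      if (Sr = 1 ∧ 1 ≤ N ∧ (if D = 0 then 1 ≤ Sc ∧ Sc ≤ Ac else Ac ≤ Sc ∧ Sc ≤ M))
          ∨ (2 ≤ Sr ∧ Sr ≤ N ∧ (if D = 0 ∨ D = 1 then 1 ≤ Sc ∧ Sc ≤ M else Sc = M))
      then "NO..." else "YES!" := by
  unfold simulate_ari_path_alt
  by_cases hin : 1 ≤ Sr ∧ Sr ≤ N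
  · rw [if_neg (by simpa using hin)]
    have hmod := PySem.Int.mod_eq_emod_of_pos (a := Sr) (b := 2) (by omega)
    simp only [hmod]
    by_cases hSr1 : Sr = 1
    · subst hSr1
      by_cases hD : D = 0 <;> by_cases hD1 : D = 1 <;>
        simp only [hD, hD1] <;> norm_num <;>
        split_ifs <;> first | rfl | (exfalso; omega)
    · simp only [if_neg hSr1]
      by_cases hD : D = 0 <;> by_cases hD1 : D = 1 <;>
        simp only [hD, hD1] <;> norm_num <;>
        split_ifs <;> first | rfl | (exfalso; omega)
  · rw [if_pos (by simpa using hin), if_neg (by rintro (⟨h, _⟩ | ⟨h, h', _⟩) <;> omega)]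

-- the standard alternating states after the first row: (col, dir) = (M, 0) or (1, 1)
theorem ariLoop_std (N M Sr Sc : Int) :
    ∀ (n : Nat) (row col dir : Int), (N + 1 - row).toNat = n →
      ((col = M ∧ dir = 0) ∨ (col = 1 ∧ dir = 1)) →
      ariLoop N M Sr Sc row col dir =
        if row ≤ Sr ∧ Sr ≤ N ∧ 1 ≤ Sc ∧ Sc ≤ M then "NO..." else "YES!" := by
  intro n
  induction n with
  | zero =>
    intro row col dir hn _
    rw [ariLoop, dif_neg (by omega), if_neg (by omega)]
  | succ k ih =>
    intro row col dir hn hst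
    have hrow : row ≤ N := by omega
    rw [ariLoop, dif_pos hrow]
    rcases hst with ⟨hc, hd⟩ | ⟨hc, hd⟩
    · -- col = M, dir = 0: sweep M..1 leftwards
      rw [hc, hd]
      show (if ariRowScan Sr Sc row (PySem.List.pyRange M (1 + -1) (-1)) then "NO..."
            else ariLoop N M Sr Sc (row + 1) 1 (1 - 0)) = _
      by_cases hhit : row = Sr ∧ 0 < Sc ∧ Sc ≤ M
      · rw [if_pos (by rw [ariRowScan_eq_true_iff, PySem.List.mem_pyRange_neg_one]; omega),
            if_pos (by omega)]
      · rw [if_neg (by rw [ariRowScan_eq_true_iff, PySem.List.mem_pyRange_neg_one]; omega)]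
        rw [show (1 : Int) - 0 = 1 by decide]
        rw [ih (row + 1) 1 1 (by omega) (Or.inr ⟨rfl, rfl⟩)]
        by_cases h2 : row + 1 ≤ Sr ∧ Sr ≤ N ∧ 1 ≤ Sc ∧ Sc ≤ M
        · rw [if_pos h2, if_pos (by omega)]
        · rw [if_neg h2, if_neg (by omega)]
    · -- col = 1, dir = 1: sweep 1..M rightwards
      rw [hc, hd]
      show (if ariRowScan Sr Sc row (PySem.List.pyRange 1 (M + 1) 1) then "NO..."
            else ariLoop N M Sr Sc (row + 1) M (1 - 1)) = _
      by_cases hhit : row = Sr ∧ 1 ≤ Sc ∧ Sc < M + 1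
      · rw [if_pos (by rw [ariRowScan_eq_true_iff, PySem.List.mem_pyRange_one]; omega),
            if_pos (by omega)]
      · rw [if_neg (by rw [ariRowScan_eq_true_iff, PySem.List.mem_pyRange_one]; omega)]
        rw [show (1 : Int) - 1 = 0 by decide]
        rw [ih (row + 1) M 0 (by omega) (Or.inl ⟨rfl, rfl⟩)]
        by_cases h2 : row + 1 ≤ Sr ∧ Sr ≤ N ∧ 1 ≤ Sc ∧ Sc ≤ M
        · rw [if_pos h2, if_pos (by omega)]
        · rw [if_neg h2, if_neg (by omega)]

-- the degenerate states when dir never becomes 0: col = M, dir ∉ {0, 1}; each row is the single cell M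
theorem ariLoop_odd (N M Sr Sc : Int) :
    ∀ (n : Nat) (row col dir : Int), (N + 1 - row).toNat = n →
      col = M → dir ≠ 0 → dir ≠ 1 →
      ariLoop N M Sr Sc row col dir =
        if row ≤ Sr ∧ Sr ≤ N ∧ Sc = M then "NO..." else "YES!" := by
  intro n
  induction n with
  | zero =>
    intro row col dir hn _ _ _
    rw [ariLoop, dif_neg (by omega), if_neg (by omega)]
  | succ k ih =>
    intro row col dir hn hc hd0 hd1
    have hrow : row ≤ N := by omega
    rw [ariLoop, dif_pos hrow, hc, if_neg hd0, if_neg hd0]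
    show (if ariRowScan Sr Sc row (PySem.List.pyRange M (M + 1) 1) then "NO..."
          else ariLoop N M Sr Sc (row + 1) M (1 - dir)) = _
    by_cases hhit : row = Sr ∧ M ≤ Sc ∧ Sc < M + 1
    · rw [if_pos (by rw [ariRowScan_eq_true_iff, PySem.List.mem_pyRange_one]; omega),
          if_pos (by omega)]
    · rw [if_neg (by rw [ariRowScan_eq_true_iff, PySem.List.mem_pyRange_one]; omega)]
      rw [ih (row + 1) M (1 - dir) (by omega) rfl (by omega) (by omega)]
      by_cases h2 : row + 1 ≤ Sr ∧ Sr ≤ N ∧ Sc = M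
      · rw [if_pos h2, if_pos (by omega)]
      · rw [if_neg h2, if_neg (by omega)]

-- ===== VERDICT (by name: the statement is the Claim_ definition above) =====
theorem simulate_ari_path_spec : Claim_equal_simulate_ari_path := by
  intro N M Ac D Sr Sc _
  unfold Spec_simulate_ari_path simulate_ari_path
  rw [alt_char]
  by_cases hN : (1 : Int) ≤ N
  · rw [ariLoop, dif_pos hN]
    by_cases hD0 : D = 0
    · rw [hD0]
      show (if ariRowScan Sr Sc 1 (PySem.List.pyRange Ac (1 + -1) (-1)) then "NO..."
            else ariLoop N M Sr Sc (1 + 1) 1 (1 - 0)) =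
           (if (Sr = 1 ∧ 1 ≤ N ∧ (1 ≤ Sc ∧ Sc ≤ Ac))
               ∨ (2 ≤ Sr ∧ Sr ≤ N ∧ (1 ≤ Sc ∧ Sc ≤ M))
            then "NO..." else "YES!")
      by_cases hhit : (1 : Int) = Sr ∧ 0 < Sc ∧ Sc ≤ Ac
      · rw [if_pos (by rw [ariRowScan_eq_true_iff, PySem.List.mem_pyRange_neg_one]; omega),
            if_pos (by omega)]
      · rw [if_neg (by rw [ariRowScan_eq_true_iff, PySem.List.mem_pyRange_neg_one]; omega)]
        rw [show (1 : Int) - 0 = 1 by decide, show (1 : Int) + 1 = 2 by decide]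
        rw [ariLoop_std N M Sr Sc (N - 1).toNat 2 1 1 (by omega) (Or.inr ⟨rfl, rfl⟩)]
        by_cases h2 : 2 ≤ Sr ∧ Sr ≤ N ∧ 1 ≤ Sc ∧ Sc ≤ M
        · rw [if_pos h2, if_pos (by omega)]
        · rw [if_neg h2, if_neg (by omega)]
    · simp only [if_neg hD0]
      show (if ariRowScan Sr Sc 1 (PySem.List.pyRange Ac (M + 1) 1) then "NO..."
            else ariLoop N M Sr Sc (1 + 1) M (1 - D)) =
           (if (Sr = 1 ∧ 1 ≤ N ∧ (Ac ≤ Sc ∧ Sc ≤ M))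
               ∨ (2 ≤ Sr ∧ Sr ≤ N ∧ (if D = 0 ∨ D = 1 then 1 ≤ Sc ∧ Sc ≤ M else Sc = M))
            then "NO..." else "YES!")
      by_cases hhit : (1 : Int) = Sr ∧ Ac ≤ Sc ∧ Sc < M + 1
      · rw [if_pos (by rw [ariRowScan_eq_true_iff, PySem.List.mem_pyRange_one]; omega),
            if_pos (Or.inl (by omega))]
      · rw [if_neg (by rw [ariRowScan_eq_true_iff, PySem.List.mem_pyRange_one]; omega)]
        rw [show (1 : Int) + 1 = 2 by decide]
        by_cases hD1 : D = 1
        · rw [hD1, show (1 : Int) - 1 = 0 by decide]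
          rw [ariLoop_std N M Sr Sc (N - 1).toNat 2 M 0 (by omega) (Or.inl ⟨rfl, rfl⟩)]
          simp only [or_true, if_true]
          by_cases h2 : 2 ≤ Sr ∧ Sr ≤ N ∧ 1 ≤ Sc ∧ Sc ≤ M
          · rw [if_pos h2, if_pos (Or.inr (by omega))]
          · rw [if_neg h2, if_neg (by omega)]
        · simp only [if_neg (show ¬(D = 0 ∨ D = 1) by rintro (h | h); exacts [hD0 h, hD1 h])]
          rw [ariLoop_odd N M Sr Sc (N - 1).toNat 2 M (1 - D) (by omega) rfl (by omega) (by omega)]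
          by_cases h2 : 2 ≤ Sr ∧ Sr ≤ N ∧ Sc = M
          · rw [if_pos h2, if_pos (Or.inr (by omega))]
          · rw [if_neg h2, if_neg (by omega)]
  · rw [ariLoop, dif_neg (by omega)]
    rw [if_neg (by rintro (⟨_, h, _⟩ | ⟨_, _, _⟩) <;> omega)]
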